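-- pv_equiv track=rewrite | github.com/gobioeng/halog | unified_parser.py | _group_parameters
-- ===== SOURCE A (Python) =====
-- from typing import Dict, List, Tuple, Optional
--
-- def _group_parameters(parameters: List[Dict]) -> Dict:
--     """Group parameters by type for organized visualization"""
--     groups = {
--         'water_system': [],
--         'temperatures': [],
--         'voltages': [],
--         'humidity': [],
--         'fan_speeds': [],
--         'other': []
--     }
--
--     for param in parameters:
--         param_name = param['parameter_name'].lower()
--
--         if any(keyword in param_name for keyword in ['flow', 'pump', 'water']):
--             groups['water_system'].append(param)
--         elif any(keyword in param_name for keyword in ['temp', 'temperature']):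
--             groups['temperatures'].append(param)
--         elif any(keyword in param_name for keyword in ['voltage', 'volt', 'v']):
--             groups['voltages'].append(param)
--         elif any(keyword in param_name for keyword in ['humidity', 'humid']):
--             groups['humidity'].append(param)
--         elif any(keyword in param_name for keyword in ['fan', 'speed']):
--             groups['fan_speeds'].append(param)
--         else:
--             groups['other'].append(param)
--
--     return groups
-- ===== SOURCE B (Python) =====
-- from typing import Dict, List
--
-- _TABLE = [
--     ('water_system', ['flow', 'pump', 'water']),
--     ('temperatures', ['temp', 'temperature']),
--     ('voltages', ['voltage', 'volt', 'v']),
--     ('humidity', ['humidity', 'humid']),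
--     ('fan_speeds', ['fan', 'speed']),
-- ]
--
-- def _category(param: Dict) -> str:
--     name = param['parameter_name'].lower()
--     return next((cat for cat, kws in _TABLE if any(k in name for k in kws)), 'other')
--
-- def _group_parameters(parameters: List[Dict]) -> Dict:
--     """Group parameters by type for organized visualization"""
--     cats = [cat for cat, _ in _TABLE] + ['other']
--     return {cat: [p for p in parameters if _category(p) == cat] for cat in cats}
-- ===== Notes on version B (the rewrite author's own statement) =====
-- stated objective: idiomatic
-- what changed: Replaces the mutating if/elif chain over a pre-built dict with a table-driven classifier (first matching (category, keywords) entry, defaulting to 'other') and a dict comprehension that builds each group by filtering, so no branch chain and no in-place appends remain.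
import Mathlib
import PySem

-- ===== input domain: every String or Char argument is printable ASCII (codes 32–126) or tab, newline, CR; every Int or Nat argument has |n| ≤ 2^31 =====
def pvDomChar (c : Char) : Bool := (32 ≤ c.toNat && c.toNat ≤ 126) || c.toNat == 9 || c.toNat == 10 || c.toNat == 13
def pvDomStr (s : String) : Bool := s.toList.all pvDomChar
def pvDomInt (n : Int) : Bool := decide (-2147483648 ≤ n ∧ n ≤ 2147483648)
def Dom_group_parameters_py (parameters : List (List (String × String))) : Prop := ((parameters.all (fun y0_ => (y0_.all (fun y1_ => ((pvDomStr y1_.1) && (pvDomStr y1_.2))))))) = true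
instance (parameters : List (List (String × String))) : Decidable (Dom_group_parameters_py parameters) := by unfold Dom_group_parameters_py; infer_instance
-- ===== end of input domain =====

-- B replaces A's mutating if/elif chain with a table-driven first-match classifier and a
-- per-category filter (idiomatic; same O(n) cost). Equivalence of the RETURN value is proved.

-- ===== PORT A =====
-- param['parameter_name'] : first-match lookup in the association list (KeyError excluded by Pre_)
def pvParamName (param : List (String × String)) : String :=
  ((PySem.Dict.mk param).get? "parameter_name").getD ""

def group_parameters_py (parameters : List (List (String × String))) : List (String × List (List (String × String))) :=
  let groups : PySem.Dict String (List (List (String × String))) :=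
    PySem.Dict.mk [("water_system", []), ("temperatures", []), ("voltages", []),
                   ("humidity", []), ("fan_speeds", []), ("other", [])]
  (parameters.foldl (fun g param =>
    let param_name := PySem.Str.lower (pvParamName param)
    if ["flow", "pump", "water"].any (fun k => PySem.Str.isIn k param_name) then
      g.modify "water_system" [] (· ++ [param])
    else if ["temp", "temperature"].any (fun k => PySem.Str.isIn k param_name) then
      g.modify "temperatures" [] (· ++ [param])
    else if ["voltage", "volt", "v"].any (fun k => PySem.Str.isIn k param_name) then
      g.modify "voltages" [] (· ++ [param])
    else if ["humidity", "humid"].any (fun k => PySem.Str.isIn k param_name) then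
      g.modify "humidity" [] (· ++ [param])
    else if ["fan", "speed"].any (fun k => PySem.Str.isIn k param_name) then
      g.modify "fan_speeds" [] (· ++ [param])
    else
      g.modify "other" [] (· ++ [param])) groups).items

-- ===== PORT B =====
def pvTable : List (String × List String) :=
  [("water_system", ["flow", "pump", "water"]),
   ("temperatures", ["temp", "temperature"]),
   ("voltages", ["voltage", "volt", "v"]),
   ("humidity", ["humidity", "humid"]),
   ("fan_speeds", ["fan", "speed"])]

def pvCategory (param : List (String × String)) : String :=
  let name := PySem.Str.lower (((PySem.Dict.mk param).get? "parameter_name").getD "")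
  ((pvTable.find? (fun e => e.2.any (fun k => PySem.Str.isIn k name))).map (·.1)).getD "other"

def group_parameters_py_alt (parameters : List (List (String × String))) : List (String × List (List (String × String))) :=
  let cats := pvTable.map (·.1) ++ ["other"]
  cats.map (fun c => (c, parameters.filter (fun p => pvCategory p == c)))

-- ===== PRECONDITION & SPEC =====
-- Pre_ excludes exactly the inputs where A raises KeyError: a param dict without 'parameter_name'.
def Pre_group_parameters_py (parameters : List (List (String × String))) : Prop :=
  (parameters.all (fun p => p.any (fun kv => kv.1 == "parameter_name"))) = true
instance (parameters : List (List (String × String))) : Decidable (Pre_group_parameters_py parameters) := by unfold Pre_group_parameters_py; infer_instance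
def pvWitness_group_parameters_py : (List (List (String × String))) := [[("parameter_name", "Mag Flow")]]

def Spec_group_parameters_py (parameters : List (List (String × String))) (out : List (String × List (List (String × String)))) : Prop := out = group_parameters_py_alt parameters
instance (parameters : List (List (String × String))) (out : List (String × List (List (String × String)))) : Decidable (Spec_group_parameters_py parameters out) := by unfold Spec_group_parameters_py; infer_instance

-- ===== CLAIM (what is proved, stated in full; the proofs are below) =====
def Claim_equal_group_parameters_py : Prop := ∀ (parameters : List (List (String × String))), Dom_group_parameters_py parameters → Pre_group_parameters_py parameters → Spec_group_parameters_py parameters (group_parameters_py parameters)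

-- ===== LEMMAS AND PROOFS =====

-- B's table lookup, written out as the same first-match chain of conditions
theorem pv_catB_chain (name : String) :
    ((pvTable.find? (fun e => e.2.any (fun k => PySem.Str.isIn k name))).map (·.1)).getD "other" =
    (if ["flow", "pump", "water"].any (fun k => PySem.Str.isIn k name) then "water_system"
     else if ["temp", "temperature"].any (fun k => PySem.Str.isIn k name) then "temperatures"
     else if ["voltage", "volt", "v"].any (fun k => PySem.Str.isIn k name) then "voltages"
     else if ["humidity", "humid"].any (fun k => PySem.Str.isIn k name) then "humidity"
     else if ["fan", "speed"].any (fun k => PySem.Str.isIn k name) then "fan_speeds"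
     else "other") := by
  cases h1 : ["flow", "pump", "water"].any (fun k => PySem.Str.isIn k name) <;>
  cases h2 : ["temp", "temperature"].any (fun k => PySem.Str.isIn k name) <;>
  cases h3 : ["voltage", "volt", "v"].any (fun k => PySem.Str.isIn k name) <;>
  cases h4 : ["humidity", "humid"].any (fun k => PySem.Str.isIn k name) <;>
  cases h5 : ["fan", "speed"].any (fun k => PySem.Str.isIn k name) <;>
    simp only [pvTable, List.find?, h1, h2, h3, h4, h5, Option.map_some, Option.map_none,
               Option.getD_some, Option.getD_none, Bool.false_eq_true] <;> rfl

-- A's branch chain performs exactly B's classification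
theorem pv_step_eq (g : PySem.Dict String (List (List (String × String)))) (param : List (String × String)) :
    (let param_name := PySem.Str.lower (pvParamName param)
     if ["flow", "pump", "water"].any (fun k => PySem.Str.isIn k param_name) then
       g.modify "water_system" [] (· ++ [param])
     else if ["temp", "temperature"].any (fun k => PySem.Str.isIn k param_name) then
       g.modify "temperatures" [] (· ++ [param])
     else if ["voltage", "volt", "v"].any (fun k => PySem.Str.isIn k param_name) then
       g.modify "voltages" [] (· ++ [param])
     else if ["humidity", "humid"].any (fun k => PySem.Str.isIn k param_name) then
       g.modify "humidity" [] (· ++ [param])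
     else if ["fan", "speed"].any (fun k => PySem.Str.isIn k param_name) then
       g.modify "fan_speeds" [] (· ++ [param])
     else
       g.modify "other" [] (· ++ [param]))
    = g.modify (pvCategory param) [] (· ++ [param]) := by
  show _ = g.modify (((pvTable.find? (fun e => e.2.any (fun k =>
      PySem.Str.isIn k (PySem.Str.lower (pvParamName param))))).map (·.1)).getD "other") [] (· ++ [param])
  rw [pv_catB_chain]
  simp only []
  split_ifs <;> rfl

theorem pv_cat_mem (param : List (String × String)) :
    pvCategory param ∈ ["water_system", "temperatures", "voltages", "humidity", "fan_speeds", "other"] := by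
  show (((pvTable.find? (fun e => e.2.any (fun k =>
      PySem.Str.isIn k (PySem.Str.lower (pvParamName param))))).map (·.1)).getD "other") ∈ _
  rw [pv_catB_chain]
  split_ifs <;> simp

-- the initial dict A builds
def pvInit : PySem.Dict String (List (List (String × String))) :=
  PySem.Dict.mk [("water_system", []), ("temperatures", []), ("voltages", []),
                 ("humidity", []), ("fan_speeds", []), ("other", [])]

theorem pv_init_getD (c : String) : pvInit.getD c [] = [] := by
  simp only [pvInit, PySem.Dict.getD_eq_get?_getD, PySem.Dict.get?_mk_cons]
  split_ifs <;> rfl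

-- A's whole loop, re-expressed as the canonical grouping fold over (category, param) pairs
theorem pv_fold_eq (parameters : List (List (String × String))) :
    group_parameters_py parameters =
    ((parameters.map (fun p => (pvCategory p, p))).foldl
      (fun d q => d.modify q.1 [] (· ++ [q.2])) pvInit).items := by
  unfold group_parameters_py
  rw [List.foldl_map]
  simp only [pv_step_eq]
  rfl

theorem pv_getD_final (parameters : List (List (String × String))) (c : String) :
    ((parameters.map (fun p => (pvCategory p, p))).foldl
      (fun d q => d.modify q.1 [] (· ++ [q.2])) pvInit).getD c []
    = parameters.filter (fun p => pvCategory p == c) := by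
  rw [PySem.Dict.getD_foldl_modify_append, pv_init_getD, List.filter_map, List.map_map]
  simp [Function.comp_def]

theorem pv_keys_final (parameters : List (List (String × String))) :
    ((parameters.map (fun p => (pvCategory p, p))).foldl
      (fun d q => d.modify q.1 [] (· ++ [q.2])) pvInit).keys
    = ["water_system", "temperatures", "voltages", "humidity", "fan_speeds", "other"] := by
  rw [PySem.Dict.keys_foldl_modify_key]
  rw [PySem.Set.update_eq_append_filter]
  have hmem : ∀ x ∈ PySem.Set.ofList ((parameters.map (fun p => (pvCategory p, p))).map (·.1)),
      PySem.Set.contains pvInit.keys x = true := by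
    intro x hx
    have hx' := (PySem.Set.mem_ofList _ _).mp hx
    simp only [List.map_map, List.mem_map, Function.comp_def] at hx'
    obtain ⟨p, -, rfl⟩ := hx'
    have := pv_cat_mem p
    simp only [PySem.Set.contains_iff]
    simpa [pvInit, PySem.Dict.keys] using this
  have : (PySem.Set.ofList ((parameters.map (fun p => (pvCategory p, p))).map (·.1))).filter
      (fun y => !(PySem.Set.contains pvInit.keys y)) = [] := by
    rw [List.filter_eq_nil_iff]
    intro a ha
    simp only [hmem a ha, Bool.not_true, Bool.false_eq_true, not_false_eq_true]
  rw [this]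
  rfl

theorem pv_nodup_final (parameters : List (List (String × String))) :
    ((parameters.map (fun p => (pvCategory p, p))).foldl
      (fun d q => d.modify q.1 [] (· ++ [q.2])) pvInit).keys.Nodup := by
  rw [pv_keys_final]
  decide

-- ===== VERDICT (by name: the statement is the Claim_ definition above) =====
theorem group_parameters_py_spec : Claim_equal_group_parameters_py := by
  intro parameters _dom _pre
  unfold Spec_group_parameters_py
  rw [pv_fold_eq]
  rw [PySem.Dict.items_eq_map_keys _ (pv_nodup_final parameters) []]
  rw [pv_keys_final]
  simp only [List.map, pv_getD_final]
  rfl
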